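-- pv_equiv track=rewrite | github.com/Hancheng-Guo/UniTreeGo1_ReinforceLearning_Controller | src/callback/stage_schedule.py | _get_increment
-- ===== SOURCE A (Python) =====
-- def _get_increment(point_dict):
--     increment = {}
--     prev_y = None
--     for x, y in sorted(point_dict.items()):
--         if prev_y is None:
--             increment[x] = y
--         else:
--             increment[x] = y - prev_y
--         prev_y = y
--     return increment
-- ===== SOURCE B (Python) =====
-- def _get_increment(point_dict):
--     # Stateless predecessor-search formulation: for each key x (in sorted order,
--     # to preserve the output dict's key order), the increment is y minus the value
--     # of the greatest key strictly below x, or y itself if no such key exists.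
--     # No running accumulator; each entry is computed independently by a scan.
--     increment = {}
--     for x, y in sorted(point_dict.items()):
--         below = [p for p in point_dict.items() if p[0] < x]
--         if below:
--             increment[x] = y - max(below, key=lambda p: p[0])[1]
--         else:
--             increment[x] = y
--     return increment
-- ===== Notes on version B (the rewrite author's own statement) =====
-- stated objective: alternative
-- what changed: B replaces A's sequential prev_y accumulator by a stateless per-key predecessor search: each entry is computed independently as y minus the value of the greatest key strictly below x, found by scanning all items (O(n^2) nested scan instead of O(n log n) single stateful pass).
import Mathlib
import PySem

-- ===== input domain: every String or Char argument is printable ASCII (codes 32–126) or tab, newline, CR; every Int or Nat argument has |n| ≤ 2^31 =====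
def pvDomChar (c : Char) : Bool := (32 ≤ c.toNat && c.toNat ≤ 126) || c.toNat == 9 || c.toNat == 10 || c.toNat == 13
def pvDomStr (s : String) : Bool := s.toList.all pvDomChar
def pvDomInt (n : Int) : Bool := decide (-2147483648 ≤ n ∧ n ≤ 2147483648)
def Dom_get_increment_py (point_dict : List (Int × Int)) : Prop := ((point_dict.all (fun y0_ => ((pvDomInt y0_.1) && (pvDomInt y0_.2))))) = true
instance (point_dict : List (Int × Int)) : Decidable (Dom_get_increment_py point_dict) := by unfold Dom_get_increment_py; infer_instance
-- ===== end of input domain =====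

-- B replaces A's prev_y-accumulator pass by a stateless per-key predecessor search (alternative algorithm; O(n^2) nested scan, not claimed faster).


-- ===== PORT A =====
-- sorted(point_dict.items()): the items of a dict have pairwise-distinct keys, so Python's
-- lexicographic tuple sort never reaches the second component — sorting by the key is exact.
def get_increment_py (point_dict : List (Int × Int)) : List (Int × Int) :=
  let res := (PySem.List.sorted point_dict (fun p => p.1) false).foldl
    (fun (s : PySem.Dict Int Int × Option Int) (p : Int × Int) =>
      match s.2 with
      | none => (s.1.insert p.1 p.2, some p.2)                 -- increment[x] = y
      | some prev => (s.1.insert p.1 (p.2 - prev), some p.2))  -- increment[x] = y - prev_y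
    ((PySem.Dict.empty : PySem.Dict Int Int), none)
  res.1.items

-- ===== PORT B =====
-- max(below, key=lambda p: p[0]) is PySem.List.max? with key fst; the 'if below' guard is the none case.
def get_increment_py_alt (point_dict : List (Int × Int)) : List (Int × Int) :=
  ((PySem.List.sorted point_dict (fun p => p.1) false).foldl
    (fun (d : PySem.Dict Int Int) (p : Int × Int) =>
      let below := point_dict.filter (fun q => decide (q.1 < p.1))
      match PySem.List.max? below (fun q => q.1) with
      | some m => d.insert p.1 (p.2 - m.2)
      | none => d.insert p.1 p.2)
    (PySem.Dict.empty : PySem.Dict Int Int)).items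

-- ===== PRECONDITION & SPEC =====
-- The Python parameter is a dict, whose items always carry pairwise-distinct keys; Pre_ restricts
-- the association list to exactly those (every Python input satisfies it; no returning input is excluded).
def Pre_get_increment_py (point_dict : List (Int × Int)) : Prop :=
  (point_dict.map Prod.fst).Nodup
instance (point_dict : List (Int × Int)) : Decidable (Pre_get_increment_py point_dict) := by
  unfold Pre_get_increment_py; infer_instance
def pvWitness_get_increment_py : (List (Int × Int)) := [(3, 10), (1, 4), (2, 7)]

def Spec_get_increment_py (point_dict : List (Int × Int)) (out : List (Int × Int)) : Prop := out = get_increment_py_alt point_dict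
instance (point_dict : List (Int × Int)) (out : List (Int × Int)) : Decidable (Spec_get_increment_py point_dict out) := by unfold Spec_get_increment_py; infer_instance

-- ===== CLAIM (what is proved, stated in full; the proofs are below) =====
def Claim_equal_get_increment_py : Prop := ∀ (point_dict : List (Int × Int)), Dom_get_increment_py point_dict → Pre_get_increment_py point_dict → Spec_get_increment_py point_dict (get_increment_py point_dict)

-- ===== LEMMAS AND PROOFS =====

-- The greatest element of ctx with key below x is m, provided m qualifies, bounds every
-- qualifying key, and keys are distinct (uniqueness of the extremal element).
theorem max_filter_below (ctx : List (Int × Int)) (x : Int) (m : Int × Int)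
    (hnd : (ctx.map Prod.fst).Nodup) (hm : m ∈ ctx) (hmx : m.1 < x)
    (hub : ∀ q ∈ ctx, q.1 < x → q.1 ≤ m.1) :
    PySem.List.max? (ctx.filter (fun q => decide (q.1 < x))) (fun q => q.1) = some m := by
  have hmem : m ∈ ctx.filter (fun q => decide (q.1 < x)) :=
    List.mem_filter.mpr ⟨hm, by simpa using hmx⟩
  cases hmax : PySem.List.max? (ctx.filter (fun q => decide (q.1 < x))) (fun q => q.1) with
  | none =>
      exact absurd ((PySem.List.max?_eq_none_iff _ _).mp hmax) (List.ne_nil_of_mem hmem)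
  | some m' =>
      have hm'mem : m' ∈ ctx.filter (fun q => decide (q.1 < x)) := PySem.List.max?_mem hmax
      have hm'ctx : m' ∈ ctx := (List.mem_filter.mp hm'mem).1
      have hm'x : m'.1 < x := by simpa using (List.mem_filter.mp hm'mem).2
      have h1 : m.1 ≤ m'.1 := PySem.List.max?_isMax hmax m hmem
      have h2 : m'.1 ≤ m.1 := hub m' hm'ctx hm'x
      have hkey : m'.1 = m.1 := le_antisymm h2 h1
      have : m' = m := by
        exact List.inj_on_of_nodup_map hnd hm'ctx hm hkey
      exact congrArg some this

-- After the first sorted item, A's loop carries `some m.2` where m is the last processed item;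
-- step for step B's body finds exactly m as the predecessor.
theorem get_increment_loop_eq (ctx : List (Int × Int)) (hnd : (ctx.map Prod.fst).Nodup) :
    ∀ (s pre : List (Int × Int)) (m : Int × Int) (d : PySem.Dict Int Int),
    ctx.Perm (pre ++ m :: s) → (pre ++ m :: s).Pairwise (fun a b => a.1 < b.1) →
    (s.foldl
      (fun (st : PySem.Dict Int Int × Option Int) (p : Int × Int) =>
        match st.2 with
        | none => (st.1.insert p.1 p.2, some p.2)
        | some pv => (st.1.insert p.1 (p.2 - pv), some p.2))
      (d, some m.2)).1
    = s.foldl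
        (fun (d : PySem.Dict Int Int) (p : Int × Int) =>
          let below := ctx.filter (fun q => decide (q.1 < p.1))
          match PySem.List.max? below (fun q => q.1) with
          | some mm => d.insert p.1 (p.2 - mm.2)
          | none => d.insert p.1 p.2)
        d := by
  intro s
  induction s with
  | nil => intro pre m d _ _; rfl
  | cons p t ih =>
      intro pre m d hperm hpw
      have hmp : m.1 < p.1 := by
        have := (List.pairwise_append.mp hpw).2.1
        exact (List.pairwise_cons.mp this).1 p (by simp)
      have hub : ∀ q ∈ ctx, q.1 < p.1 → q.1 ≤ m.1 := by
        intro q hq hqx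
        have hq' : q ∈ pre ++ m :: p :: t := hperm.mem_iff.mp hq
        rcases List.mem_append.mp hq' with hq1 | hq2
        · have := (List.pairwise_append.mp hpw).2.2 q hq1 m (by simp)
          exact le_of_lt this
        · rcases hq2 with _ | ⟨_, hq3⟩
          · exact le_refl _
          · exfalso
            have hpair := (List.pairwise_append.mp hpw).2.1
            rcases hq3 with _ | ⟨_, hq4⟩
            · exact absurd hqx (lt_irrefl _)
            · have : p.1 < q.1 :=
                ((List.pairwise_cons.mp ((List.pairwise_cons.mp hpair).2)).1) q hq4
              omega
      have hmax := max_filter_below ctx p.1 m hnd (hperm.mem_iff.mpr (by simp)) hmp hub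
      have e : (pre ++ [m]) ++ p :: t = pre ++ m :: p :: t := by simp
      have hperm' : ctx.Perm ((pre ++ [m]) ++ p :: t) := by rw [e]; exact hperm
      have hpw' : ((pre ++ [m]) ++ p :: t).Pairwise (fun a b => a.1 < b.1) := by rw [e]; exact hpw
      simpa [List.foldl, hmax] using ih (pre ++ [m]) p (d.insert p.1 (p.2 - m.2)) hperm' hpw'

-- Strict pairwise order of the sorted items, from stability (≤) plus distinct keys.
theorem sorted_pairwise_strict (l : List (Int × Int)) (hnd : (l.map Prod.fst).Nodup) :
    (PySem.List.sorted l (fun p => p.1) false).Pairwise (fun a b => a.1 < b.1) := by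
  have hle := PySem.List.sorted_pairwise (xs := l) (key := fun p => p.1)
  have hperm := PySem.List.sorted_perm (xs := l) (key := fun p => p.1) (rev := false)
  have hnd' : ((PySem.List.sorted l (fun p => p.1) false).map Prod.fst).Nodup :=
    ((hperm.map Prod.fst).nodup_iff).mpr hnd
  have hne : (PySem.List.sorted l (fun p => p.1) false).Pairwise (fun a b => a.1 ≠ b.1) :=
    (List.pairwise_map.mp hnd')
  exact (hle.and hne).imp (fun h => lt_of_le_of_ne h.1 h.2)

-- ===== VERDICT (by name: the statement is the Claim_ definition above) =====
theorem get_increment_py_spec : Claim_equal_get_increment_py := by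
  intro point_dict _ hpre
  unfold Spec_get_increment_py get_increment_py get_increment_py_alt
  have hperm := PySem.List.sorted_perm (xs := point_dict) (key := fun p => p.1) (rev := false)
  have hpw := sorted_pairwise_strict point_dict hpre
  cases h : PySem.List.sorted point_dict (fun p => p.1) false with
  | nil => rfl
  | cons hd tl =>
      rw [h] at hperm hpw
      -- head: no key of point_dict lies below hd.1, so B's filter is empty
      have hfilt : point_dict.filter (fun q => decide (q.1 < hd.1)) = [] := by
        rw [List.filter_eq_nil_iff]
        intro q hq
        have hq' : q ∈ hd :: tl := hperm.symm.mem_iff.mp hq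
        rcases hq' with _ | ⟨_, hq2⟩
        · simp
        · have : hd.1 < q.1 := (List.pairwise_cons.mp hpw).1 q hq2
          simp; omega
      have hmax : PySem.List.max? (point_dict.filter (fun q => decide (q.1 < hd.1)))
          (fun q => (q : Int × Int).1) = none := by
        rw [hfilt]; exact (PySem.List.max?_eq_none_iff _ _).mpr rfl
      have hperm0 : point_dict.Perm ([] ++ hd :: tl) := by simpa using hperm.symm
      have hpw0 : ([] ++ hd :: tl).Pairwise (fun a b : Int × Int => a.1 < b.1) := by simpa using hpw
      simpa [List.foldl, hmax] using
        congrArg PySem.Dict.items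
          (get_increment_loop_eq point_dict hpre tl [] hd
            ((PySem.Dict.empty : PySem.Dict Int Int).insert hd.1 hd.2) hperm0 hpw0)
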